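-- pv_equiv track=rewrite | github.com/AnnaIasinskaia/Usatges_de_Barcelona | inspect_unified_scoring.py | ocrish_token_count
-- ===== SOURCE A (Python) =====
-- from typing import Any, Dict, List, Optional, Sequence, Tuple
--
-- def ocrish_token_count(tokens: Sequence[str]) -> int:
--     bad = 0
--     for t in tokens:
--         if not t:
--             continue
--         vowels = sum(ch in "aeiouy" for ch in t.lower())
--         has_digit = any(ch.isdigit() for ch in t)
--         has_alpha = any(ch.isalpha() for ch in t)
--         if len(t) >= 8 and vowels <= 1:
--             bad += 1
--         elif has_digit and has_alpha:
--             bad += 1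
--         elif any(ch * 4 in t for ch in set(t)):
--             bad += 1
--     return bad
-- ===== SOURCE B (Python) =====
-- def _has_quad(t):
--     # True iff some character occurs 4 times consecutively in t
--     i = 0
--     while i + 3 < len(t):
--         if t[i] == t[i + 1] == t[i + 2] == t[i + 3]:
--             return True
--         i += 1
--     return False
--
--
-- def ocrish_token_count(tokens):
--     bad = 0
--     for t in tokens:
--         if not t:
--             continue
--         vowels = 0
--         has_digit = False
--         has_alpha = False
--         for ch in t:
--             if ch.lower() in "aeiouy":
--                 vowels += 1
--             if ch.isdigit():
--                 has_digit = True
--             if ch.isalpha():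
--                 has_alpha = True
--         if len(t) >= 8 and vowels <= 1:
--             bad += 1
--         elif has_digit and has_alpha:
--             bad += 1
--         elif _has_quad(t):
--             bad += 1
--     return bad
-- ===== Notes on version B (the rewrite author's own statement) =====
-- stated objective: faster
-- what changed: Replaces A's three separate per-token passes plus a substring search 'ch*4 in t' per distinct character with one fused pass accumulating vowels/digit/alpha flags and a single linear sliding-window scan for four equal consecutive characters.
import Mathlib
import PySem

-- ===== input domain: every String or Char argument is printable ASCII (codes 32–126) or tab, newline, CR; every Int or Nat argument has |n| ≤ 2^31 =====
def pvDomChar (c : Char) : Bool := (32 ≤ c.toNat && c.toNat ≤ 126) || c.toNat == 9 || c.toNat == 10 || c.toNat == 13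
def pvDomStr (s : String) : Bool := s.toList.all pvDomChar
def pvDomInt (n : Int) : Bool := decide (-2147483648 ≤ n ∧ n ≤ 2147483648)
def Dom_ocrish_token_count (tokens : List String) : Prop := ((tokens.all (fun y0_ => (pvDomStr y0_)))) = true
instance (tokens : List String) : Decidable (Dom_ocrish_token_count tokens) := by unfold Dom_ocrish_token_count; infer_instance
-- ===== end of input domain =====

-- B fuses A's three per-token passes and its per-distinct-char substring search into one
-- accumulating pass plus one linear sliding-window scan for a 4-run (objective: faster).

-- ===== PORT A =====
-- per-token body of A's loop
def pvBodyA (bad : Int) (t : String) : Int :=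
  if t = "" then bad
  else
    let cs := t.toList
    -- vowels = sum(ch in "aeiouy" for ch in t.lower())
    let vowels : Int := ((PySem.Chars.lower cs).map
      (fun ch => if ("aeiouy".toList).contains ch then (1 : Int) else 0)).sum
    let has_digit := cs.any PySem.Chars.isdigit
    let has_alpha := cs.any PySem.Chars.isalpha
    if 8 ≤ cs.length ∧ vowels ≤ 1 then bad + 1
    else if has_digit && has_alpha then bad + 1
    -- any(ch * 4 in t for ch in set(t)) ; ch * 4 = List.replicate 4 ch
    else if (PySem.Set.ofList cs).any
        (fun ch => PySem.Chars.isIn (List.replicate 4 ch) cs) then bad + 1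
    else bad

def ocrish_token_count (tokens : List String) : Int :=
  tokens.foldl pvBodyA 0

-- ===== PORT B =====
-- _has_quad: slide a width-4 window over the characters
def pvHasQuad : List Char → Bool
  | a :: b :: c :: d :: r => (a == b && b == c && c == d) || pvHasQuad (b :: c :: d :: r)
  | _ => false

-- the fused single pass: (vowels, has_digit, has_alpha)
def pvScan (cs : List Char) : Int × Bool × Bool :=
  cs.foldl
    (fun st ch =>
      (st.1 + (if ("aeiouy".toList).contains (PySem.Chars.lowerChar ch) then (1 : Int) else 0),
       st.2.1 || PySem.Chars.isdigit ch,
       st.2.2 || PySem.Chars.isalpha ch))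
    (0, false, false)

def pvBodyB (bad : Int) (t : String) : Int :=
  if t = "" then bad
  else
    let cs := t.toList
    let s := pvScan cs
    if 8 ≤ cs.length ∧ s.1 ≤ 1 then bad + 1
    else if s.2.1 && s.2.2 then bad + 1
    else if pvHasQuad cs then bad + 1
    else bad

def ocrish_token_count_alt (tokens : List String) : Int :=
  tokens.foldl pvBodyB 0

-- ===== PRECONDITION & SPEC =====
def Spec_ocrish_token_count (tokens : List String) (out : Int) : Prop := out = ocrish_token_count_alt tokens
instance (tokens : List String) (out : Int) : Decidable (Spec_ocrish_token_count tokens out) := by unfold Spec_ocrish_token_count; infer_instance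

-- ===== CLAIM (what is proved, stated in full; the proofs are below) =====
def Claim_equal_ocrish_token_count : Prop := ∀ (tokens : List String), Dom_ocrish_token_count tokens → Spec_ocrish_token_count tokens (ocrish_token_count tokens)

-- ===== LEMMAS AND PROOFS =====

-- the fused pass computes the three quantities of A's separate passes, for any start state
theorem pvScan_fold (cs : List Char) (v : Int) (d al : Bool) :
    cs.foldl
      (fun st ch =>
        (st.1 + (if ("aeiouy".toList).contains (PySem.Chars.lowerChar ch) then (1 : Int) else 0),
         st.2.1 || PySem.Chars.isdigit ch,
         st.2.2 || PySem.Chars.isalpha ch)) (v, d, al)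
    = (v + ((PySem.Chars.lower cs).map
          (fun ch => if ("aeiouy".toList).contains ch then (1 : Int) else 0)).sum,
       d || cs.any PySem.Chars.isdigit, al || cs.any PySem.Chars.isalpha) := by
  induction cs generalizing v d al with
  | nil =>
    have hn : PySem.Chars.lower ([] : List Char) = [] := rfl
    simp [hn]
  | cons ch rest ih =>
    have hl : PySem.Chars.lower (ch :: rest) = PySem.Chars.lowerChar ch :: PySem.Chars.lower rest := rfl
    simp only [List.foldl_cons, ih, hl, List.map_cons, List.sum_cons, List.any_cons,
      Prod.mk.injEq]
    refine ⟨by ring, ?_, ?_⟩ <;> exact Bool.or_assoc _ _ _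

theorem pvScan_eq (cs : List Char) :
    pvScan cs =
      (((PySem.Chars.lower cs).map
          (fun ch => if ("aeiouy".toList).contains ch then (1 : Int) else 0)).sum,
       cs.any PySem.Chars.isdigit, cs.any PySem.Chars.isalpha) := by
  have := pvScan_fold cs 0 false false
  simpa [pvScan] using this

-- the window scan finds exactly the tokens in which some char fills a length-4 infix
theorem pvHasQuad_iff (cs : List Char) :
    pvHasQuad cs = true ↔ ∃ ch, List.replicate 4 ch <:+: cs := by
  induction cs using pvHasQuad.induct with
  | case1 a b c d r ih =>
    rw [pvHasQuad, Bool.or_eq_true, ih]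
    constructor
    · rintro (h | ⟨ch, h⟩)
      · simp only [Bool.and_eq_true, beq_iff_eq] at h
        obtain ⟨⟨h1, h2⟩, h3⟩ := h
        subst h1; subst h2; subst h3
        exact ⟨a, (List.prefix_append (List.replicate 4 a) r).isInfix⟩
      · exact ⟨ch, List.infix_cons h⟩
    · rintro ⟨ch, h⟩
      rw [List.infix_cons_iff] at h
      rcases h with h | h
      · left
        simp only [List.replicate, List.cons_prefix_cons] at h
        obtain ⟨h1, h2, h3, h4, -⟩ := h
        simp only [Bool.and_eq_true, beq_iff_eq]
        exact ⟨⟨h1.symm.trans h2, h2.symm.trans h3⟩, h3.symm.trans h4⟩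
      · exact Or.inr ⟨ch, h⟩
  | case2 x h =>
    constructor
    · intro hq
      exfalso
      match x, h with
      | [], _ => simp [pvHasQuad] at hq
      | [a], _ => simp [pvHasQuad] at hq
      | [a, b], _ => simp [pvHasQuad] at hq
      | [a, b, c], _ => simp [pvHasQuad] at hq
      | a :: b :: c :: d :: r, h => exact (h a b c d r rfl).elim
    · rintro ⟨ch, hinf⟩
      have hlen := hinf.length_le
      simp only [List.length_replicate] at hlen
      match x, h with
      | [], _ => simp at hlen
      | [a], _ => simp at hlen
      | [a, b], _ => simp at hlen
      | [a, b, c], _ => simp at hlen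
      | a :: b :: c :: d :: r, h => exact (h a b c d r rfl).elim

theorem pvQuadAny_eq (cs : List Char) :
    (PySem.Set.ofList cs).any
      (fun ch => PySem.Chars.isIn (List.replicate 4 ch) cs) = pvHasQuad cs := by
  rw [Bool.eq_iff_iff, pvHasQuad_iff, List.any_eq_true]
  constructor
  · rintro ⟨ch, -, h⟩
    exact ⟨ch, (PySem.Chars.isIn_iff_infix _ _).mp h⟩
  · rintro ⟨ch, h⟩
    refine ⟨ch, ?_, (PySem.Chars.isIn_iff_infix _ _).mpr h⟩
    have hm : ch ∈ cs := h.subset (by simp)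
    exact (PySem.Set.mem_ofList _ _).mpr hm

theorem pvBody_eq (bad : Int) (t : String) : pvBodyA bad t = pvBodyB bad t := by
  unfold pvBodyA pvBodyB
  by_cases h : t = "" <;>
    simp only [h, if_false, pvScan_eq, pvQuadAny_eq, if_pos]

-- ===== VERDICT (by name: the statement is the Claim_ definition above) =====
theorem ocrish_token_count_spec : Claim_equal_ocrish_token_count := by
  intro tokens _
  unfold Spec_ocrish_token_count ocrish_token_count ocrish_token_count_alt
  have h : pvBodyA = pvBodyB := funext fun b => funext fun t => pvBody_eq b t
  rw [h]
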